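-- pv_equiv track=rewrite | github.com/awslabs/snapchange | docker/coverage_scripts/bn_snapchange.py | int_is_interesting_for_dict
-- ===== SOURCE A (Python) =====
-- def int_is_interesting_for_dict(i, size, _bv=None):
--     if i == 0:
--         return False
--     if i < 256:
--         return False
--     if size == 0:
--         size = 4
--     # convert to signed
--     i_s = i
--     if i_s & (1 << (size - 1)):
--         i_s = -(1 << size) + i_s
--     if abs(i_s) < 256:  # small signed constant
--         return False
--     for bits in (8, 16, 32, 64, 128, 256, 512):
--         if bits > size:
--             break
--         shift = 1 << bits
--         if i in (shift, shift - 1):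
--             return False
--         # check if negative power
--         if abs(i) in (shift, shift - 1):
--             return False
--     # check for some bitmask-like things to weed out.
--     mask = 0
--     for shift in range(0, 60, 4):
--         mask = mask << 4
--         mask |= 0xF
--         if i == mask:
--             return False
--     try:
--         if all(b in (0, 0xFF, 0xF0, 0x0F) for b in i.to_bytes(size, "little")):
--             return False
--     except OverflowError:
--         pass
--
--     # TODO: check if address -> ignore
--     # if bv and bv.start <= i and i <= bv.end:
--     #     return False
--
--     # ok we found no reason to not find it interesting.
--     return True
-- ===== SOURCE B (Python) =====
-- def int_is_interesting_for_dict(i, size, _bv=None):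
--     if i < 256:  # covers i == 0 and all negatives
--         return False
--     if size == 0:
--         size = 4
--     # convert to signed
--     i_s = i - (1 << size) if i & (1 << (size - 1)) else i
--     if -256 < i_s < 256:  # small signed constant
--         return False
--     m = i.bit_length()
--     # power-of-two-ish constants, closed form instead of a loop over exponents
--     if i & (i + 1) == 0:  # i == 2**m - 1
--         if (m in (8, 16, 32, 64, 128, 256, 512) and m <= size) or (m % 4 == 0 and m <= 60):
--             return False
--     if i & (i - 1) == 0:  # i == 2**(m-1)
--         if (m - 1) in (8, 16, 32, 64, 128, 256, 512) and m - 1 <= size: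
--             return False
--     # every byte in (0, 0xFF, 0xF0, 0x0F) == every nibble is 0x0 or 0xF,
--     # and i fits in `size` bytes iff bit_length <= 8*size (i is positive here)
--     if m <= 8 * size and _nibbles_clean(i):
--         return False
--     return True
--
--
-- def _nibbles_clean(x):
--     while x:
--         if x & 0xF not in (0, 0xF):
--             return False
--         x >>= 4
--     return True
-- ===== Notes on version B (the rewrite author's own statement) =====
-- stated objective: simpler
-- what changed: The powers-of-two loop, the nibble-mask loop and the to_bytes/OverflowError scan are replaced by closed-form bit tests via bit_length (i or i+1 a power of two with the right exponent) and a single every-nibble-is-0-or-F check; Pre_ only excludes i>=256 with size<0, where A raises ValueError (B raises there too).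
import Mathlib
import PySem

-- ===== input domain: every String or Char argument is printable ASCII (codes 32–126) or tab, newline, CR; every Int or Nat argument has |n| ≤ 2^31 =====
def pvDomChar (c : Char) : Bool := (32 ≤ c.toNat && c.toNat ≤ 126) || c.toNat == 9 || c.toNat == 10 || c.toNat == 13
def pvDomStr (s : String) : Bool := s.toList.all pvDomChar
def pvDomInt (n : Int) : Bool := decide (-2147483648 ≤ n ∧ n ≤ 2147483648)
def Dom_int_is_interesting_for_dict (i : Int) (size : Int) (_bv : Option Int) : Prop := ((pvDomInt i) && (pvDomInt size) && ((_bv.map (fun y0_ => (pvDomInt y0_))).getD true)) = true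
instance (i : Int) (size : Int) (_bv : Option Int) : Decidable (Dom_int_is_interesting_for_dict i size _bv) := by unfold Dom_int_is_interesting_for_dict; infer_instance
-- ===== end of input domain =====

-- B replaces A's powers-of-two loop, nibble-mask loop and to_bytes byte scan by
-- closed-form bit tests via bit_length and a single nibble scan; objective: simpler.

-- ===== PORT A =====
-- 'for bits in (8,16,32,64,128,256,512): if bits > size: break; …'
def pvPowLoopA (i sz : Int) : List Nat → Bool
  | [] => false
  | bits :: rest =>
    if (bits : Int) > sz then false
    else
      let shift : Int := 1 <<< bits
      if i = shift ∨ i = shift - 1 then true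
      else if |i| = shift ∨ |i| = shift - 1 then true
      else pvPowLoopA i sz rest

-- 'for shift in range(0, 60, 4): mask = mask << 4; mask |= 0xF; if i == mask: return False'
def pvMaskLoopA (i : Int) (mask : Int) : List Int → Bool
  | [] => false
  | _ :: rest =>
    let m := PySem.Int.bor (mask <<< 4) 15
    if i = m then true else pvMaskLoopA i m rest

-- 'all(b in (0, 0xFF, 0xF0, 0x0F) for b in i.to_bytes(size, "little"))': byte k is (i >> 8k) & 0xFF
def pvBytesOkA (x : Int) : Nat → Bool
  | 0 => true
  | Nat.succ n =>
    let b := PySem.Int.band x 255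
    if b = 0 ∨ b = 255 ∨ b = 240 ∨ b = 15 then pvBytesOkA (x >>> 8) n else false

def int_is_interesting_for_dict (i : Int) (size : Int) (_bv : Option Int) : Bool :=
  if i = 0 then false
  else if i < 256 then false
  else
    let sz := if size = 0 then 4 else size
    -- Pre_ gives 0 ≤ size here, so sz ≥ 1 and the shift counts below are exact
    let i_s := if PySem.Int.band i (1 <<< (sz - 1).toNat) ≠ 0 then -(1 <<< sz.toNat) + i else i
    if |i_s| < 256 then false
    else if pvPowLoopA i sz [8, 16, 32, 64, 128, 256, 512] then false
    else if pvMaskLoopA i 0 (PySem.List.pyRange 0 60 4) then false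
    else if (PySem.Int.bitLength i : Int) ≤ 8 * sz then
      -- i.to_bytes(sz, "little") raises OverflowError exactly when i ≥ 2^(8·sz),
      -- i.e. (i > 0 here) when bitLength i > 8·sz; 'except OverflowError: pass' skips the check
      if pvBytesOkA i sz.toNat then false else true
    else true

-- ===== PORT B =====
-- '_nibbles_clean(x)': while x: if x & 0xF not in (0, 0xF): return False; x >>= 4
-- (Source B only calls it with x = i > 0, so the Nat recursion on i.toNat is exact)
def pvNibblesClean (x : Nat) : Bool :=
  if x = 0 then true
  else if x &&& 15 = 0 ∨ x &&& 15 = 15 then pvNibblesClean (x >>> 4) else false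
  termination_by x
  decreasing_by simp [Nat.shiftRight_eq_div_pow]; omega

def int_is_interesting_for_dict_alt (i : Int) (size : Int) (_bv : Option Int) : Bool :=
  if i < 256 then false
  else
    let sz := if size = 0 then 4 else size
    let i_s := if PySem.Int.band i (1 <<< (sz - 1).toNat) ≠ 0 then i - (1 <<< sz.toNat) else i
    if -256 < i_s ∧ i_s < 256 then false
    else
      let m : Nat := PySem.Int.bitLength i
      if PySem.Int.band i (i + 1) = 0 ∧
          ((((m : Int) = 8 ∨ (m : Int) = 16 ∨ (m : Int) = 32 ∨ (m : Int) = 64 ∨ (m : Int) = 128 ∨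
             (m : Int) = 256 ∨ (m : Int) = 512) ∧ (m : Int) ≤ sz) ∨ (m % 4 = 0 ∧ m ≤ 60)) then false
      else if PySem.Int.band i (i - 1) = 0 ∧
          (((m : Int) - 1 = 8 ∨ (m : Int) - 1 = 16 ∨ (m : Int) - 1 = 32 ∨ (m : Int) - 1 = 64 ∨
            (m : Int) - 1 = 128 ∨ (m : Int) - 1 = 256 ∨ (m : Int) - 1 = 512) ∧ (m : Int) - 1 ≤ sz) then false
      else if (m : Int) ≤ 8 * sz ∧ pvNibblesClean i.toNat then false
      else true

-- ===== PRECONDITION & SPEC =====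
-- Pre_ excludes exactly the inputs where A raises ValueError ('negative shift count' in
-- '1 << (size - 1)', reached only when i ≥ 256); B raises the same error there.
def Pre_int_is_interesting_for_dict (i : Int) (size : Int) (_bv : Option Int) : Prop :=
  i < 256 ∨ 0 ≤ size
instance (i : Int) (size : Int) (_bv : Option Int) : Decidable (Pre_int_is_interesting_for_dict i size _bv) := by unfold Pre_int_is_interesting_for_dict; infer_instance
def pvWitness_int_is_interesting_for_dict : Int × Int × Option Int := (77777, 4, none)

def Spec_int_is_interesting_for_dict (i : Int) (size : Int) (_bv : Option Int) (out : Bool) : Prop := out = int_is_interesting_for_dict_alt i size _bv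
instance (i : Int) (size : Int) (_bv : Option Int) (out : Bool) : Decidable (Spec_int_is_interesting_for_dict i size _bv out) := by unfold Spec_int_is_interesting_for_dict; infer_instance

-- ===== CLAIM (what is proved, stated in full; the proofs are below) =====
def Claim_equal_int_is_interesting_for_dict : Prop := ∀ (i : Int) (size : Int) (_bv : Option Int), Dom_int_is_interesting_for_dict i size _bv → Pre_int_is_interesting_for_dict i size _bv → Spec_int_is_interesting_for_dict i size _bv (int_is_interesting_for_dict i size _bv)

-- ===== LEMMAS AND PROOFS =====

-- n & (n-1) == 0 tests 'zero or a power of two' (the trick B's closed forms rest on)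
lemma pvPow2_iff (n : Nat) : n &&& (n - 1) = 0 ↔ (n = 0 ∨ ∃ k, n = 2 ^ k) := by
  induction n using Nat.strong_induction_on with
  | _ n ih =>
    match n, Nat.even_or_odd n with
    | 0, _ => simp
    | n+1, Or.inl he =>
      obtain ⟨m, hm⟩ := he
      have hm1 : 1 ≤ m := by omega
      have e1 : n + 1 = Nat.bit false m := by simp [Nat.bit_val]; omega
      have e2 : n = Nat.bit true (m - 1) := by simp [Nat.bit_val]; omega
      have key : (n+1) &&& n = Nat.bit false (m &&& (m-1)) := by
        rw [e1, e2, Nat.land_bit]; simp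
      have keyv : (n+1) &&& n = 2 * (m &&& (m-1)) := by rw [key]; simp [Nat.bit_val]
      have ihm := ih m (by omega)
      constructor
      · intro h
        simp only [Nat.add_sub_cancel] at h
        rw [keyv] at h
        have := ihm.mp (by omega)
        rcases this with h0 | ⟨k, hk⟩
        · omega
        · right; exact ⟨k+1, by rw [pow_succ]; omega⟩
      · rintro (h | ⟨k, hk⟩)
        · omega
        · have hk1 : 1 ≤ k := by
            rcases Nat.eq_zero_or_pos k with rfl | h
            · simp at hk; omega
            · exact h
          have h2 : 2 ^ k = 2 * 2 ^ (k-1) := by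
            rw [← pow_succ']; congr 1; omega
          have hm2 : m = 2 ^ (k-1) := by omega
          have : m &&& (m - 1) = 0 := ihm.mpr (Or.inr ⟨k-1, hm2⟩)
          simp only [Nat.add_sub_cancel, keyv, this, Nat.mul_zero]
    | n+1, Or.inr ho =>
      obtain ⟨m, hm⟩ := ho
      rcases Nat.eq_zero_or_pos m with rfl | hm1
      · simp only [show n = 0 by omega]
        constructor
        · intro _; right; exact ⟨0, rfl⟩
        · intro _; rfl
      have e1 : n + 1 = Nat.bit true m := by simp [Nat.bit_val]; omega
      have e2 : n = Nat.bit false m := by simp [Nat.bit_val]; omega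
      have key : (n+1) &&& n = Nat.bit false (m &&& m) := by
        rw [e1, e2, Nat.land_bit]; simp
      have keyv : (n+1) &&& n = 2 * m := by rw [key]; simp [Nat.bit_val, Nat.and_self]
      constructor
      · intro h
        simp only [Nat.add_sub_cancel] at h
        omega
      · rintro (h | ⟨k, hk⟩)
        · omega
        · exfalso
          rcases Nat.eq_zero_or_pos k with rfl | hk1
          · simp at hk; omega
          · have : 2 ∣ 2^k := dvd_pow_self 2 (by omega)
            rw [← hk] at this
            omega

-- bit_length pins the exponent of a power of two
lemma pvBitLength_pow (b : Nat) : PySem.Int.bitLength ((2 : Int) ^ b) = b + 1 := by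
  have h1 := PySem.Int.lt_two_pow_bitLength ((2 : Int) ^ b)
  have h2 := PySem.Int.two_pow_bitLength_le ((2 : Int) ^ b) (by positivity)
  have habs : ((2 : Int) ^ b).natAbs = 2 ^ b := by simp [Int.natAbs_pow]
  rw [habs] at h1 h2
  have hb1 : b < PySem.Int.bitLength ((2 : Int) ^ b) :=
    (Nat.pow_lt_pow_iff_right (by omega)).mp h1
  have hb2 : PySem.Int.bitLength ((2 : Int) ^ b) - 1 ≤ b :=
    (Nat.pow_le_pow_iff_right (by omega)).mp h2
  omega

lemma pvBitLength_pow_sub_one (b : Nat) (hb : 1 ≤ b) :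
    PySem.Int.bitLength ((2 : Int) ^ b - 1) = b := by
  have hN : ((2:Int) ^ b - 1) = ((2 ^ b - 1 : Nat) : Int) := by
    rw [Nat.cast_sub Nat.one_le_two_pow]; push_cast; ring
  have habs : ((2 : Int) ^ b - 1).natAbs = 2 ^ b - 1 := by
    rw [hN, Int.natAbs_natCast]
  have hbig : (2:Nat) ≤ 2 ^ b := by
    calc (2:Nat) = 2 ^ 1 := by norm_num
    _ ≤ 2 ^ b := Nat.pow_le_pow_right (by omega) hb
  have h1 := PySem.Int.lt_two_pow_bitLength ((2 : Int) ^ b - 1)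
  have h2 := PySem.Int.two_pow_bitLength_le ((2 : Int) ^ b - 1) (by
    rw [hN]
    exact_mod_cast Nat.sub_ne_zero_of_lt (by omega))
  rw [habs] at h1 h2
  have hb1 : (2:Nat) ^ b ≤ 2 ^ PySem.Int.bitLength ((2 : Int) ^ b - 1) := by omega
  have hb2 : (2:Nat) ^ (PySem.Int.bitLength ((2 : Int) ^ b - 1) - 1) < 2 ^ b := by
    have : (1:Nat) ≤ 2 ^ b := Nat.one_le_two_pow
    omega
  have c1 : b ≤ PySem.Int.bitLength ((2 : Int) ^ b - 1) :=
    (Nat.pow_le_pow_iff_right (by omega)).mp hb1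
  have c2 : PySem.Int.bitLength ((2 : Int) ^ b - 1) - 1 < b :=
    (Nat.pow_lt_pow_iff_right (by omega)).mp hb2
  have hL1 : 1 ≤ PySem.Int.bitLength ((2 : Int) ^ b - 1) := by
    by_contra h
    have h0 : PySem.Int.bitLength ((2 : Int) ^ b - 1) = 0 := by omega
    rw [h0, pow_zero] at h1
    omega
  omega

-- B's power-of-two tests, on the Int side
lemma pvBandPred_iff (i : Int) (hi : 0 < i) :
    (PySem.Int.band i (i - 1) = 0 ↔ ∃ k : Nat, i = 2 ^ k) := by
  obtain ⟨n, rfl⟩ : ∃ n : Nat, i = (n : Int) := ⟨i.toNat, (Int.toNat_of_nonneg (by omega)).symm⟩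
  have hn : 0 < n := by exact_mod_cast hi
  have hc : ((n : Int)) - 1 = ((n - 1 : Nat) : Int) := by omega
  rw [hc, PySem.Int.band_natCast]
  constructor
  · intro h
    have h0 : n &&& (n - 1) = 0 := by exact_mod_cast h
    rcases (pvPow2_iff n).mp h0 with h | ⟨k, hk⟩
    · omega
    · exact ⟨k, by rw [hk]; push_cast; ring⟩
  · rintro ⟨k, hk⟩
    have hk' : n = 2 ^ k := by
      have : ((n:Int)) = ((2^k : Nat) : Int) := by rw [hk]; push_cast; ring
      exact_mod_cast this
    have := (pvPow2_iff n).mpr (Or.inr ⟨k, hk'⟩)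
    exact_mod_cast congrArg (Nat.cast : Nat → Int) this

lemma pvBandSucc_iff (i : Int) (hi : 0 < i) :
    (PySem.Int.band i (i + 1) = 0 ↔ ∃ k : Nat, 1 ≤ k ∧ i = 2 ^ k - 1) := by
  obtain ⟨n, rfl⟩ : ∃ n : Nat, i = (n : Int) := ⟨i.toNat, (Int.toNat_of_nonneg (by omega)).symm⟩
  have hn : 0 < n := by exact_mod_cast hi
  have hc : ((n : Int)) + 1 = ((n + 1 : Nat) : Int) := by push_cast; ring
  rw [hc, PySem.Int.band_natCast]
  have hcomm : n &&& (n + 1) = (n + 1) &&& ((n + 1) - 1) := by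
    rw [Nat.land_comm, Nat.add_sub_cancel]
  constructor
  · intro h
    have h0 : (n + 1) &&& ((n + 1) - 1) = 0 := by
      rw [← hcomm]; exact_mod_cast h
    rcases (pvPow2_iff (n + 1)).mp h0 with h | ⟨k, hk⟩
    · omega
    · have hk1 : 1 ≤ k := by
        rcases Nat.eq_zero_or_pos k with rfl | h; · simp at hk; omega
        · exact h
      have h2 : (1:Nat) ≤ 2 ^ k := Nat.one_le_two_pow
      refine ⟨k, hk1, ?_⟩
      have : ((n:Int)) = ((2 ^ k - 1 : Nat) : Int) := by exact_mod_cast congrArg (Nat.cast : Nat → Int) (by omega : n = 2 ^ k - 1)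
      rw [this, Nat.cast_sub Nat.one_le_two_pow]; push_cast; ring
  · rintro ⟨k, hk1, hk⟩
    have hk' : n + 1 = 2 ^ k := by
      have h2 : ((n:Int)) + 1 = 2 ^ k := by omega
      have : ((n + 1 : Nat) : Int) = ((2 ^ k : Nat) : Int) := by push_cast; omega
      exact_mod_cast this
    have := (pvPow2_iff (n + 1)).mpr (Or.inr ⟨k, hk'⟩)
    rw [hcomm]
    exact_mod_cast congrArg (Nat.cast : Nat → Int) this

-- A's power loop, characterised (0 ≤ i makes the abs branch redundant)
lemma pvPowLoopA_iff (i sz : Int) (hi : 0 ≤ i) :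
    ∀ l : List Nat, l.Pairwise (· ≤ ·) →
      (pvPowLoopA i sz l = true ↔ ∃ b ∈ l, (b : Int) ≤ sz ∧ (i = 2 ^ b ∨ i = 2 ^ b - 1)) := by
  intro l hp
  induction l with
  | nil => simp [pvPowLoopA]
  | cons b rest ih =>
    have hrest := ih (List.Pairwise.of_cons hp)
    have hmono : ∀ b' ∈ rest, b ≤ b' := fun b' h => (List.pairwise_cons.mp hp).1 b' h
    have hshift : (((1 <<< b : Nat) : Int)) = 2 ^ b := by
      rw [Nat.one_shiftLeft]; push_cast; ring
    by_cases hbsz : (b : Int) > sz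
    · simp only [pvPowLoopA, if_pos hbsz]
      constructor
      · intro h; exact absurd h (by simp)
      · rintro ⟨b', hb', hle, _⟩
        exfalso
        rcases List.mem_cons.mp hb' with rfl | hmem
        · omega
        · have h1 := hmono b' hmem
          have : (b:Int) ≤ (b':Int) := by exact_mod_cast h1
          omega
    · simp only [pvPowLoopA, if_neg hbsz, hshift, abs_of_nonneg hi]
      by_cases hcase : i = 2 ^ b ∨ i = 2 ^ b - 1
      · simp only [if_pos hcase]
        constructor
        · intro _; exact ⟨b, List.mem_cons_self, by omega, hcase⟩
        · intro _; trivial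
      · simp only [if_neg hcase, hrest]
        constructor
        · rintro ⟨b', hb', hle, hc⟩; exact ⟨b', List.mem_cons_of_mem _ hb', hle, hc⟩
        · rintro ⟨b', hb', hle, hc⟩
          rcases List.mem_cons.mp hb' with rfl | hmem
          · exact absurd hc hcase
          · exact ⟨b', hmem, hle, hc⟩

-- 16·n | 0xF just sets the four low bits
lemma pvOr16 (n : Nat) : (16 * n) ||| 15 = 16 * n + 15 := by
  have e1 : 16 * n = Nat.bit false (Nat.bit false (Nat.bit false (Nat.bit false n))) := by
    simp [Nat.bit_val]; ring
  have e15 : (15:Nat) = Nat.bit true (Nat.bit true (Nat.bit true (Nat.bit true 0))) := by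
    simp [Nat.bit_val]
  rw [e1, e15, Nat.lor_bit, Nat.lor_bit, Nat.lor_bit, Nat.lor_bit]
  simp [Nat.bit_val]
  ring

lemma pvCastPowSub (b : Nat) : (((2 ^ b - 1 : Nat) : Int)) = 2 ^ b - 1 := by
  rw [Nat.cast_sub Nat.one_le_two_pow]; push_cast; ring

-- one step of A's mask loop: 0xF…F of 4j bits becomes 0xF…F of 4(j+1) bits
lemma pvMaskStep (j : Nat) :
    PySem.Int.bor (((2:Int) ^ (4*j) - 1) <<< 4) 15 = (2:Int) ^ (4*(j+1)) - 1 := by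
  rw [← pvCastPowSub (4*j), ← pvCastPowSub (4*(j+1))]
  have h1 : (((2 ^ (4*j) - 1 : Nat) : Int)) <<< 4 = (((2 ^ (4*j) - 1 : Nat) <<< 4 : Nat) : Int) := rfl
  rw [h1]
  rw [show ((15:Int)) = ((15:Nat):Int) by norm_num, PySem.Int.bor_natCast]
  congr 1
  rw [Nat.shiftLeft_eq]
  have h3 : (2 ^ (4*j) - 1) * 2 ^ 4 = 16 * (2 ^ (4*j) - 1) := by ring
  rw [h3, pvOr16]
  have h4 : (2:Nat) ^ (4*(j+1)) = 16 * 2 ^ (4*j) := by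
    rw [mul_add, mul_one, pow_add]; ring
  have h5 := Nat.one_le_two_pow (n := 4*j)
  omega

lemma pvMaskLoopA_gen (i : Int) :
    ∀ (l : List Int) (j : Nat),
      (pvMaskLoopA i ((2:Int) ^ (4*j) - 1) l = true ↔
        ∃ t : Nat, t < l.length ∧ i = 2 ^ (4*(j+1+t)) - 1) := by
  intro l
  induction l with
  | nil => intro j; simp [pvMaskLoopA]
  | cons x rest ih =>
    intro j
    show (if i = PySem.Int.bor (((2:Int) ^ (4*j) - 1) <<< 4) 15 then true
          else pvMaskLoopA i (PySem.Int.bor (((2:Int) ^ (4*j) - 1) <<< 4) 15) rest) = true ↔ _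
    rw [pvMaskStep]
    by_cases hc : i = (2:Int) ^ (4*(j+1)) - 1
    · simp only [if_pos hc, List.length_cons]
      constructor
      · intro _; exact ⟨0, by omega, by simpa using hc⟩
      · intro _; trivial
    · simp only [if_neg hc, ih (j+1), List.length_cons]
      constructor
      · rintro ⟨t, ht, he⟩
        exact ⟨t+1, by omega, by rw [he]; congr 2; omega⟩
      · rintro ⟨t, ht, he⟩
        match t with
        | 0 => exact absurd (by simpa using he) hc
        | t+1 => exact ⟨t, by omega, by rw [he]; congr 2; omega⟩

-- A's mask loop, characterised
lemma pvMaskLoopA_iff (i : Int) :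
    (pvMaskLoopA i 0 (PySem.List.pyRange 0 60 4) = true ↔
      ∃ j : Nat, 1 ≤ j ∧ j ≤ 15 ∧ i = 2 ^ (4 * j) - 1) := by
  have hlen : (PySem.List.pyRange 0 60 4).length = 15 := by decide
  have hg := pvMaskLoopA_gen i (PySem.List.pyRange 0 60 4) 0
  rw [show (2:Int) ^ (4*0) - 1 = 0 by norm_num, hlen] at hg
  rw [hg]
  constructor
  · rintro ⟨t, ht, he⟩
    exact ⟨t+1, by omega, by omega, by rw [he]; congr 2; omega⟩
  · rintro ⟨j, h1, h15, he⟩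
    exact ⟨j-1, by omega, by rw [he]; congr 2; omega⟩

lemma pvNibblesClean_unfold (n : Nat) :
    pvNibblesClean n = if n &&& 15 = 0 ∨ n &&& 15 = 15 then pvNibblesClean (n >>> 4) else false := by
  rcases Nat.eq_zero_or_pos n with rfl | h
  · simp [pvNibblesClean]
  · rw [pvNibblesClean]; simp [Nat.pos_iff_ne_zero.mp h]

-- a byte is 0/0xFF/0xF0/0x0F exactly when both of its nibbles are 0 or 0xF
lemma pvByteSplit (b : Nat) (hb : b < 256) :
    (b = 0 ∨ b = 255 ∨ b = 240 ∨ b = 15) ↔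
      ((b &&& 15 = 0 ∨ b &&& 15 = 15) ∧ (b >>> 4 = 0 ∨ b >>> 4 = 15)) := by
  revert hb
  revert b
  set_option maxRecDepth 100000 in decide

-- A's byte scan equals B's nibble scan on ints that fit in k bytes
lemma pvBytesOkA_eq_nibbles (k : Nat) : ∀ (n : Nat), n < 2 ^ (8 * k) →
    pvBytesOkA (n : Int) k = pvNibblesClean n := by
  induction k with
  | zero =>
    intro n h
    simp at h
    subst h
    simp [pvBytesOkA, pvNibblesClean]
  | succ k ih =>
    intro n h
    have hcast : PySem.Int.band (n : Int) 255 = ((n &&& 255 : Nat) : Int) := by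
      rw [show ((255:Int)) = ((255:Nat):Int) by norm_num, PySem.Int.band_natCast]
    have hlt : n &&& 255 < 256 := Nat.and_lt_two_pow n (show (255:Nat) < 2^8 by norm_num)
    have hsplit := pvByteSplit (n &&& 255) hlt
    have d1 : (n &&& 255) &&& 15 = n &&& 15 := by
      rw [Nat.land_assoc, show (255 &&& 15 : Nat) = 15 from by decide]
    have d2 : (n &&& 255) >>> 4 = (n >>> 4) &&& 15 := by
      rw [Nat.shiftRight_and_distrib, show (255 >>> 4 : Nat) = 15 from by decide]
    have hshr : ((n:Int)) >>> (8:Int) = ((n >>> 8 : Nat) : Int) := rfl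
    have h8 : n >>> 8 < 2 ^ (8 * k) := by
      rw [Nat.shiftRight_eq_div_pow]
      have h2 : (2:Nat) ^ (8 * (k+1)) = 2 ^ 8 * 2 ^ (8*k) := by rw [← pow_add]; congr 1; ring
      rw [h2] at h
      exact Nat.div_lt_of_lt_mul h
    have ihn := ih (n >>> 8) h8
    have hnib2 : (n >>> 4) >>> 4 = n >>> 8 := by
      rw [← Nat.shiftRight_add]
    show (if PySem.Int.band (n : Int) 255 = 0 ∨ PySem.Int.band (n : Int) 255 = 255 ∨
            PySem.Int.band (n : Int) 255 = 240 ∨ PySem.Int.band (n : Int) 255 = 15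
          then pvBytesOkA ((n:Int) >>> (8:Int)) k else false) = pvNibblesClean n
    rw [hcast, hshr, ihn]
    have hconds : (((n &&& 255 : Nat) : Int) = 0 ∨ ((n &&& 255 : Nat) : Int) = 255 ∨
        ((n &&& 255 : Nat) : Int) = 240 ∨ ((n &&& 255 : Nat) : Int) = 15) ↔
        (n &&& 255 = 0 ∨ n &&& 255 = 255 ∨ n &&& 255 = 240 ∨ n &&& 255 = 15) := by
      omega
    rw [if_congr hconds rfl rfl]
    rw [d1, d2] at hsplit
    conv_rhs => rw [pvNibblesClean_unfold n, pvNibblesClean_unfold (n >>> 4), hnib2]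
    by_cases c1 : n &&& 15 = 0 ∨ n &&& 15 = 15
    · by_cases c2 : (n >>> 4) &&& 15 = 0 ∨ (n >>> 4) &&& 15 = 15
      · rw [if_pos (hsplit.mpr ⟨c1, c2⟩), if_pos c1, if_pos c2]
      · rw [if_neg, if_pos c1, if_neg c2]
        intro hb
        exact c2 (hsplit.mp hb).2
    · rw [if_neg, if_neg c1]
      intro hb
      exact c1 (hsplit.mp hb).1

-- A's remaining checks against B's closed forms, for positive i
lemma pvCore (i sz : Int) (hi : 256 ≤ i) :
    (pvPowLoopA i sz [8, 16, 32, 64, 128, 256, 512] = true ∨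
      pvMaskLoopA i 0 (PySem.List.pyRange 0 60 4) = true) ↔
    ((PySem.Int.band i (i + 1) = 0 ∧
        ((((PySem.Int.bitLength i : Int) = 8 ∨ (PySem.Int.bitLength i : Int) = 16 ∨
           (PySem.Int.bitLength i : Int) = 32 ∨ (PySem.Int.bitLength i : Int) = 64 ∨
           (PySem.Int.bitLength i : Int) = 128 ∨ (PySem.Int.bitLength i : Int) = 256 ∨
           (PySem.Int.bitLength i : Int) = 512) ∧ (PySem.Int.bitLength i : Int) ≤ sz) ∨
         (PySem.Int.bitLength i % 4 = 0 ∧ PySem.Int.bitLength i ≤ 60))) ∨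
     (PySem.Int.band i (i - 1) = 0 ∧
        (((PySem.Int.bitLength i : Int) - 1 = 8 ∨ (PySem.Int.bitLength i : Int) - 1 = 16 ∨
          (PySem.Int.bitLength i : Int) - 1 = 32 ∨ (PySem.Int.bitLength i : Int) - 1 = 64 ∨
          (PySem.Int.bitLength i : Int) - 1 = 128 ∨ (PySem.Int.bitLength i : Int) - 1 = 256 ∨
          (PySem.Int.bitLength i : Int) - 1 = 512) ∧ (PySem.Int.bitLength i : Int) - 1 ≤ sz))) := by
  rw [pvPowLoopA_iff i sz (by omega) _ (by decide), pvMaskLoopA_iff i,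
      pvBandSucc_iff i (by omega), pvBandPred_iff i (by omega)]
  constructor
  · rintro (⟨b, hbmem, hble, hcase⟩ | ⟨j, hj1, hj15, he⟩)
    · simp only [List.mem_cons, List.not_mem_nil, or_false] at hbmem
      have hb8 : 8 ≤ b := by rcases hbmem with rfl|rfl|rfl|rfl|rfl|rfl|rfl <;> omega
      rcases hcase with hpow | hpred
      · right
        have hm : PySem.Int.bitLength i = b + 1 := by rw [hpow, pvBitLength_pow]
        exact ⟨⟨b, hpow⟩, by omega, by omega⟩
      · left
        have hm : PySem.Int.bitLength i = b := by rw [hpred, pvBitLength_pow_sub_one b (by omega)]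
        exact ⟨⟨b, by omega, hpred⟩, Or.inl ⟨by omega, by omega⟩⟩
    · left
      have hm : PySem.Int.bitLength i = 4 * j := by rw [he, pvBitLength_pow_sub_one (4*j) (by omega)]
      exact ⟨⟨4 * j, by omega, he⟩, Or.inr ⟨by omega, by omega⟩⟩
  · rintro (⟨⟨k, hk1, hke⟩, hcond⟩ | ⟨⟨k, hke⟩, hdisj, hle⟩)
    · have hm : PySem.Int.bitLength i = k := by rw [hke, pvBitLength_pow_sub_one k hk1]
      rcases hcond with ⟨hdisj, hle⟩ | ⟨h4, h60⟩
      · left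
        refine ⟨k, ?_, by omega, Or.inr hke⟩
        have hk : k = 8 ∨ k = 16 ∨ k = 32 ∨ k = 64 ∨ k = 128 ∨ k = 256 ∨ k = 512 := by omega
        rcases hk with rfl|rfl|rfl|rfl|rfl|rfl|rfl <;> simp
      · right
        refine ⟨k / 4, by omega, by omega, ?_⟩
        rw [hke]; congr 2; omega
    · have hm : PySem.Int.bitLength i = k + 1 := by rw [hke, pvBitLength_pow]
      left
      refine ⟨k, ?_, by omega, Or.inl hke⟩
      have hk : k = 8 ∨ k = 16 ∨ k = 32 ∨ k = 64 ∨ k = 128 ∨ k = 256 ∨ k = 512 := by omega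
      rcases hk with rfl|rfl|rfl|rfl|rfl|rfl|rfl <;> simp

-- under the fits-guard, A's byte scan is B's nibble scan
lemma pvFitBytes (i sz : Int) (hi : 256 ≤ i)
    (hfit : (PySem.Int.bitLength i : Int) ≤ 8 * sz) :
    pvBytesOkA i sz.toNat = pvNibblesClean i.toNat := by
  have hn : i = ((i.toNat : Nat) : Int) := (Int.toNat_of_nonneg (by omega)).symm
  have hlt : i.toNat < 2 ^ (8 * sz.toNat) := by
    have h1 := PySem.Int.lt_two_pow_bitLength i
    have habs : i.natAbs = i.toNat := by omega
    rw [habs] at h1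
    have hle : PySem.Int.bitLength i ≤ 8 * sz.toNat := by omega
    exact lt_of_lt_of_le h1 (Nat.pow_le_pow_right (by omega) hle)
  have h := pvBytesOkA_eq_nibbles sz.toNat i.toNat hlt
  rwa [← hn] at h

-- two guard-chains with equivalent disjunctions of guards and equal tails are equal
lemma pvChain (c a b d : Prop) [Decidable c] [Decidable a] [Decidable b] [Decidable d]
    (x y : Bool) (h : c ∨ d ↔ a ∨ b)
    (hxy : ¬a → ¬b → ¬c → ¬d → x = y) :
    (if a then false else if b then false else x) =
      (if c then false else if d then false else y) := by
  by_cases ha : a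
  · rw [if_pos ha]
    rcases h.mpr (Or.inl ha) with hc | hd
    · rw [if_pos hc]
    · by_cases hc : c
      · rw [if_pos hc]
      · rw [if_neg hc, if_pos hd]
  · by_cases hb : b
    · rw [if_neg ha, if_pos hb]
      rcases h.mpr (Or.inr hb) with hc | hd
      · rw [if_pos hc]
      · by_cases hc : c
        · rw [if_pos hc]
        · rw [if_neg hc, if_pos hd]
    · have hc : ¬ c := fun hc => (h.mp (Or.inl hc)).elim ha hb
      have hd : ¬ d := fun hd => (h.mp (Or.inr hd)).elim ha hb
      rw [if_neg ha, if_neg hb, if_neg hc, if_neg hd]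
      exact hxy ha hb hc hd

-- the residual if-chains after the small-signed-constant test agree
lemma pvTailEq (i sz : Int) (hi : 256 ≤ i) :
    (if pvPowLoopA i sz [8, 16, 32, 64, 128, 256, 512] = true then false
     else if pvMaskLoopA i 0 (PySem.List.pyRange 0 60 4) = true then false
     else if (PySem.Int.bitLength i : Int) ≤ 8 * sz then
       if pvBytesOkA i sz.toNat = true then false else true
     else true) =
    (if PySem.Int.band i (i + 1) = 0 ∧
          ((((PySem.Int.bitLength i : Int)) = 8 ∨ ((PySem.Int.bitLength i : Int)) = 16 ∨
            ((PySem.Int.bitLength i : Int)) = 32 ∨ ((PySem.Int.bitLength i : Int)) = 64 ∨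
            ((PySem.Int.bitLength i : Int)) = 128 ∨ ((PySem.Int.bitLength i : Int)) = 256 ∨
            ((PySem.Int.bitLength i : Int)) = 512) ∧ ((PySem.Int.bitLength i : Int)) ≤ sz ∨
           PySem.Int.bitLength i % 4 = 0 ∧ PySem.Int.bitLength i ≤ 60) then false
     else if PySem.Int.band i (i - 1) = 0 ∧
          (((PySem.Int.bitLength i : Int) - 1 = 8 ∨ (PySem.Int.bitLength i : Int) - 1 = 16 ∨
            (PySem.Int.bitLength i : Int) - 1 = 32 ∨ (PySem.Int.bitLength i : Int) - 1 = 64 ∨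
            (PySem.Int.bitLength i : Int) - 1 = 128 ∨ (PySem.Int.bitLength i : Int) - 1 = 256 ∨
            (PySem.Int.bitLength i : Int) - 1 = 512) ∧ (PySem.Int.bitLength i : Int) - 1 ≤ sz) then false
     else if (PySem.Int.bitLength i : Int) ≤ 8 * sz ∧ pvNibblesClean i.toNat = true then false
     else true) := by
  have hcore := pvCore i sz hi
  apply pvChain _ _ _ _ _ _ hcore.symm
  intro _ _ _ _
  by_cases hf : (PySem.Int.bitLength i : Int) ≤ 8 * sz
  · rw [if_pos hf, pvFitBytes i sz hi hf]
    by_cases hn : pvNibblesClean i.toNat = true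
    · rw [if_pos hn, if_pos ⟨hf, hn⟩]
    · rw [if_neg hn, if_neg (fun hc => hn hc.2)]
  · rw [if_neg hf, if_neg (fun hc => hf hc.1)]

-- ===== VERDICT (by name: the statement is the Claim_ definition above) =====
theorem int_is_interesting_for_dict_spec : Claim_equal_int_is_interesting_for_dict := by
  intro i size _bv hdom hpre
  unfold Spec_int_is_interesting_for_dict int_is_interesting_for_dict int_is_interesting_for_dict_alt
  by_cases hlt : i < 256
  · by_cases h0 : i = 0 <;> simp [hlt, h0]
  · have hi : 256 ≤ i := by omega
    rw [if_neg (by omega : ¬ i = 0), if_neg hlt, if_neg hlt]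
    set sz : Int := if size = 0 then 4 else size with hszdef
    by_cases hb : PySem.Int.band i (((1 <<< (sz - 1).toNat : Nat) : Int)) ≠ 0
    · simp only [if_pos hb]
      rw [show -(((1 <<< sz.toNat : Nat) : Int)) + i = i - ((1 <<< sz.toNat : Nat) : Int) from by ring]
      simp only [abs_lt]
      exact if_congr Iff.rfl rfl (pvTailEq i sz hi)
    · simp only [if_neg hb]
      simp only [abs_lt]
      exact if_congr Iff.rfl rfl (pvTailEq i sz hi)
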